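-- pv_equiv track=rewrite | github.com/bc-python-OLD-IT-WILL-BE-REMOVED/game | othello/othello[procedural]/othello-v2/logic.py | findbestcoords
-- ===== SOURCE A (Python) =====
-- from collections import defaultdict
--
-- def findbestcoords(cells_scores):
--     """
-- ????
--     """
--     bestscore  = -1
--     bestcoords = defaultdict(list)
--
--     for coords, score in cells_scores.items():
--         if score >= bestscore:
--             bestscore = score
--
--             bestcoords[score].append(coords)
--
--     return bestscore, bestcoords[bestscore]
-- ===== SOURCE B (Python) =====
-- def findbestcoords(cells_scores):
--     bestscore = max([-1, *cells_scores.values()])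
--     bestcoords = [coords for coords, score in cells_scores.items() if score == bestscore]
--     return bestscore, bestcoords
-- ===== Notes on version B (the rewrite author's own statement) =====
-- stated objective: simpler
-- what changed: B replaces A's single-pass running-max scan with a score-keyed defaultdict(list) of buckets by two staged passes: first compute the best score with built-in max over the values (seeded with the -1 sentinel), then filter the items once for the coords achieving it.
import Mathlib
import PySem

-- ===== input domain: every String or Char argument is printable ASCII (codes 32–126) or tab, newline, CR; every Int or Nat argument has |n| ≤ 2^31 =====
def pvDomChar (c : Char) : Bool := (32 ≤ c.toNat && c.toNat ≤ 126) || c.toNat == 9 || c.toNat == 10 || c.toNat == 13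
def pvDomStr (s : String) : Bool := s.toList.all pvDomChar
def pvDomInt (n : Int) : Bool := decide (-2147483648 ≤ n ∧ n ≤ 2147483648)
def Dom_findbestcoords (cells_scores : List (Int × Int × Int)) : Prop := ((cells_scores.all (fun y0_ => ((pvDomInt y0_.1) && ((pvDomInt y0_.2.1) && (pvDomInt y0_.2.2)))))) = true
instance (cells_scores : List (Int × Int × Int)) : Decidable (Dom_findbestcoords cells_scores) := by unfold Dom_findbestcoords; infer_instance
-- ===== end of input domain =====

-- B is simpler: instead of A's one-pass scan maintaining a score-keyed defaultdict of
-- coordinate buckets, B makes two staged passes — max over the values (seeded with -1),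
-- then a filter for the coords achieving that max.

-- ===== PORT A =====
-- A: bestscore = -1; bestcoords = defaultdict(list); for coords, score in items:
--    if score >= bestscore: bestscore = score; bestcoords[score].append(coords)
-- return bestscore, bestcoords[bestscore]
def findbestcoords (cells_scores : List (Int × Int × Int)) : Int × (List (Int × Int)) :=
  let st := cells_scores.foldl
    (fun (st : Int × PySem.Dict Int (List (Int × Int))) c =>
      if st.1 ≤ c.2.2 then
        (c.2.2, st.2.modify c.2.2 [] (· ++ [(c.1, c.2.1)]))  -- defaultdict(list): missing key defaults to []
      else st)
    (-1, PySem.Dict.empty)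
  (st.1, st.2.getD st.1 [])   -- bestcoords[bestscore] on the defaultdict

-- ===== PORT B =====
-- B: bestscore = max([-1, *values]); bestcoords = [c for c, s in items if s == bestscore]
def findbestcoords_alt (cells_scores : List (Int × Int × Int)) : Int × (List (Int × Int)) :=
  let bestscore := (cells_scores.map (fun c => c.2.2)).foldl max (-1)  -- builtin max on the nonempty Int list [-1, *values]
  (bestscore, (cells_scores.filter (fun c => c.2.2 == bestscore)).map (fun c => (c.1, c.2.1)))

-- ===== PRECONDITION & SPEC =====
def Spec_findbestcoords (cells_scores : List (Int × Int × Int)) (out : Int × (List (Int × Int))) : Prop := out = findbestcoords_alt cells_scores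
instance (cells_scores : List (Int × Int × Int)) (out : Int × (List (Int × Int))) : Decidable (Spec_findbestcoords cells_scores out) := by unfold Spec_findbestcoords; infer_instance

-- ===== CLAIM =====
def Claim_equal_findbestcoords : Prop := ∀ (cells_scores : List (Int × Int × Int)), Dom_findbestcoords cells_scores → Spec_findbestcoords cells_scores (findbestcoords cells_scores)

-- ===== LEMMAS AND PROOFS =====

-- the seed is a lower bound of a foldl max
theorem pv_le_foldl_max : ∀ (cs : List Int) (s : Int), s ≤ cs.foldl max s := by
  intro cs
  induction cs with
  | nil => intro s; simp
  | cons c rest ih =>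
    intro s
    exact le_trans (le_max_left s c) (ih (max s c))

-- Main invariant: running A's loop from state (s, d) yields best = max of s and all scores,
-- and the bucket at that best is d's bucket there followed by the coords of entries hitting it.
theorem pvMain : ∀ (cs : List (Int × Int × Int)) (s : Int) (d : PySem.Dict Int (List (Int × Int))),
    ((cs.foldl
        (fun (st : Int × PySem.Dict Int (List (Int × Int))) c =>
          if st.1 ≤ c.2.2 then (c.2.2, st.2.modify c.2.2 [] (· ++ [(c.1, c.2.1)])) else st)
        (s, d)).1,
     (cs.foldl
        (fun (st : Int × PySem.Dict Int (List (Int × Int))) c =>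
          if st.1 ≤ c.2.2 then (c.2.2, st.2.modify c.2.2 [] (· ++ [(c.1, c.2.1)])) else st)
        (s, d)).2.getD
       ((cs.foldl
        (fun (st : Int × PySem.Dict Int (List (Int × Int))) c =>
          if st.1 ≤ c.2.2 then (c.2.2, st.2.modify c.2.2 [] (· ++ [(c.1, c.2.1)])) else st)
        (s, d)).1) []) =
    (((cs.map (fun c => c.2.2)).foldl max s),
     d.getD ((cs.map (fun c => c.2.2)).foldl max s) [] ++
       (cs.filter (fun c => c.2.2 == (cs.map (fun c => c.2.2)).foldl max s)).map (fun c => (c.1, c.2.1))) := by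
  intro cs
  induction cs with
  | nil => intro s d; simp
  | cons c rest ih =>
    intro s d
    simp only [List.foldl_cons, List.map_cons, List.filter_cons]
    by_cases hle : s ≤ c.2.2
    · rw [if_pos hle, max_eq_right hle,
        ih c.2.2 (d.modify c.2.2 [] (· ++ [(c.1, c.2.1)]))]
      have hM : c.2.2 ≤ (rest.map (fun c => c.2.2)).foldl max c.2.2 := pv_le_foldl_max _ _
      by_cases heq : c.2.2 = (rest.map (fun c => c.2.2)).foldl max c.2.2
      · have hbucket : (d.modify c.2.2 [] (· ++ [(c.1, c.2.1)])).getD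
            ((rest.map (fun c => c.2.2)).foldl max c.2.2) [] =
            d.getD ((rest.map (fun c => c.2.2)).foldl max c.2.2) [] ++ [(c.1, c.2.1)] := by
          rw [← heq, PySem.Dict.getD_modify_self]
        rw [hbucket]
        simp [← heq]
      · have hbucket : (d.modify c.2.2 [] (· ++ [(c.1, c.2.1)])).getD
            ((rest.map (fun c => c.2.2)).foldl max c.2.2) [] =
            d.getD ((rest.map (fun c => c.2.2)).foldl max c.2.2) [] :=
          PySem.Dict.getD_modify_of_ne _ _ _ (Ne.symm heq)
        rw [hbucket]
        simp [heq]
    · rw [if_neg hle, max_eq_left (le_of_lt (lt_of_not_ge hle)), ih s d]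
      have hM : s ≤ (rest.map (fun c => c.2.2)).foldl max s := pv_le_foldl_max _ _
      have hne : ¬ (c.2.2 = (rest.map (fun c => c.2.2)).foldl max s) := by
        have := lt_of_not_ge hle; intro h; omega
      simp [hne]

-- ===== VERDICT =====
theorem findbestcoords_spec : Claim_equal_findbestcoords := by
  intro cs _
  unfold Spec_findbestcoords findbestcoords findbestcoords_alt
  rw [pvMain cs (-1) PySem.Dict.empty]
  simp [PySem.Dict.getD_empty]
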